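-- pv_equiv track=rewrite | github.com/nicknicknick4444/portfolio | squaresg/logico/squares_logic.py | win_test
-- ===== SOURCE A (Python) =====
-- def win_test(listy, exceppo):
--     listy2 = []
--     listy2 = [i for i in listy]
--     for index, i in enumerate(listy2):
--         if listy2[index] == "blank":
--             listy2[index] = str(exceppo)
--     if listy2 == ["1","2","3","4","5","6","7","8","9"]:
--         return True
--     else:
--         return False
-- ===== SOURCE B (Python) =====
-- def win_test(listy, exceppo):
--     if len(listy) != 9:
--         return False
--     for index, value in enumerate(listy):
--         want = str(index + 1)
--         if not (value == want or (value == "blank" and str(exceppo) == want)):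
--             return False
--     return True
-- ===== Notes on version B (the rewrite author's own statement) =====
-- stated objective: simpler
-- what changed: B fuses A's three passes (list copy, in-place blank-replacement loop, whole-list comparison) into one early-exit indexed pass that checks each position directly against its expected digit, building no intermediate list.
import Mathlib
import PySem

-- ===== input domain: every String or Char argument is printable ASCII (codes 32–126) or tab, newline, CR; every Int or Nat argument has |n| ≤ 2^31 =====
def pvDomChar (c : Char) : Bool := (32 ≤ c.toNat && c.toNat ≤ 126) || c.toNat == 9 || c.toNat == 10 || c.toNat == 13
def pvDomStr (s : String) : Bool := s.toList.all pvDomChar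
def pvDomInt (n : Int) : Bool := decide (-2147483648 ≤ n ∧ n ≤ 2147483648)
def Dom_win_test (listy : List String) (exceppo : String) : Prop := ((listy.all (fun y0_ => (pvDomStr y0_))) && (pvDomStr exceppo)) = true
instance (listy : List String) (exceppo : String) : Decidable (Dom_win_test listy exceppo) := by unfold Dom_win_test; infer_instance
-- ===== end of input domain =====

-- B fuses A's copy/replace/compare passes into one early-exit indexed check; objective: simpler.


-- ===== PORT A =====
-- copy, then in-place loop over enumerate replacing "blank" by str(exceppo), then whole-list compare
def win_test (listy : List String) (exceppo : String) : Bool :=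
  let listy2 := listy.map (fun i => i)
  let listy2 := (PySem.List.enumerate listy2 0).foldl
    (fun acc p =>
      if PySem.List.pyGetD acc p.1 "" == "blank" then PySem.List.pySetD acc p.1 exceppo else acc)
    listy2
  listy2 == ["1","2","3","4","5","6","7","8","9"]

-- ===== PORT B =====
-- single early-exit pass: each position must hold its digit, or be "blank" with exceppo the digit
def win_test_alt (listy : List String) (exceppo : String) : Bool :=
  if listy.length ≠ 9 then false
  else (PySem.List.enumerate listy 0).all (fun p =>
    let want := PySem.Int.toStr (p.1 + 1)
    p.2 == want || (p.2 == "blank" && exceppo == want))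

-- ===== PRECONDITION & SPEC =====
def Spec_win_test (listy : List String) (exceppo : String) (out : Bool) : Prop := out = win_test_alt listy exceppo
instance (listy : List String) (exceppo : String) (out : Bool) : Decidable (Spec_win_test listy exceppo out) := by unfold Spec_win_test; infer_instance

-- ===== CLAIM (what is proved, stated in full; the proofs are below) =====
def Claim_equal_win_test : Prop := ∀ (listy : List String) (exceppo : String), Dom_win_test listy exceppo → Spec_win_test listy exceppo (win_test listy exceppo)

-- ===== LEMMAS AND PROOFS =====

-- A's replace loop equals an elementwise map, over any already-processed prefix
theorem pv_loop_eq_map (exceppo : String) (xs pre : List String) :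
    (PySem.List.enumerate xs (pre.length : Int)).foldl
      (fun acc p =>
        if PySem.List.pyGetD acc p.1 "" == "blank" then PySem.List.pySetD acc p.1 exceppo else acc)
      (pre ++ xs)
    = pre ++ xs.map (fun x => if x == "blank" then exceppo else x) := by
  induction xs generalizing pre with
  | nil => simp [PySem.List.enumerate_nil]
  | cons x xs ih =>
    rw [PySem.List.enumerate_cons]
    simp only [List.foldl_cons]
    have hget : PySem.List.pyGetD (pre ++ x :: xs) (pre.length : Int) "" = x := by
      rw [PySem.List.pyGetD_natCast]
      simp [List.getD_eq_getElem?_getD]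
    have harg : ((pre.length : Int) + 1) = (((pre.length + 1 : Nat)) : Int) := by push_cast; ring
    by_cases hx : x = "blank"
    · have hset : PySem.List.pySetD (pre ++ x :: xs) (pre.length : Int) exceppo
          = pre ++ exceppo :: xs := by
        rw [PySem.List.pySetD_natCast]
        simp
      rw [hget, if_pos (show (x == "blank") = true by simp [hx]), hset, harg]
      have := ih (pre ++ [exceppo])
      simp only [List.append_assoc, List.singleton_append, List.length_append,
        List.length_singleton] at this
      simpa [hx] using this
    · rw [hget, if_neg (show ¬ (x == "blank") = true by simp [hx]), harg]
      have := ih (pre ++ [x])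
      simp only [List.append_assoc, List.singleton_append, List.length_append,
        List.length_singleton] at this
      simpa [hx] using this

-- per-position correspondence between A's replaced cell and B's disjunction
theorem pv_cell (a e n : String) (hn : n ≠ "blank") :
    ((if a = "blank" then e else a) == n) = (a == n || (a == "blank" && e == n)) := by
  by_cases h : a = "blank"
  · simp [h, (by simpa [eq_comm] using hn : ¬ ("blank" : String) = n)]
  · simp [h]

theorem win_test_spec : Claim_equal_win_test := by
  intro listy exceppo _
  unfold Spec_win_test win_test win_test_alt
  simp only [List.map_id']
  have hfold := pv_loop_eq_map exceppo listy []
  simp only [List.nil_append, List.length_nil, Nat.cast_zero] at hfold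
  rw [hfold]
  rcases listy with _|⟨a1,_|⟨a2,_|⟨a3,_|⟨a4,_|⟨a5,_|⟨a6,_|⟨a7,_|⟨a8,_|⟨a9,_|⟨b,rest⟩⟩⟩⟩⟩⟩⟩⟩⟩⟩
  all_goals try (simp [PySem.List.enumerate_cons]; done)
  simp only [List.length_cons, List.length_nil, List.map_cons, List.map_nil,
    PySem.List.enumerate_cons, PySem.List.enumerate_nil, List.all_cons, List.all_nil]
  norm_num
  rw [pv_cell a1 exceppo "1" (by decide), pv_cell a2 exceppo "2" (by decide),
      pv_cell a3 exceppo "3" (by decide), pv_cell a4 exceppo "4" (by decide),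
      pv_cell a5 exceppo "5" (by decide), pv_cell a6 exceppo "6" (by decide),
      pv_cell a7 exceppo "7" (by decide), pv_cell a8 exceppo "8" (by decide),
      pv_cell a9 exceppo "9" (by decide)]
  have hts : ∀ k : Int, PySem.Int.toStr k = String.ofList (PySem.Int.toChars k) := fun _ => rfl
  simp only [hts,
    (by decide : String.ofList (PySem.Int.toChars 1) = "1"),
    (by decide : String.ofList (PySem.Int.toChars 2) = "2"),
    (by decide : String.ofList (PySem.Int.toChars 3) = "3"),
    (by decide : String.ofList (PySem.Int.toChars 4) = "4"),
    (by decide : String.ofList (PySem.Int.toChars 5) = "5"),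
    (by decide : String.ofList (PySem.Int.toChars 6) = "6"),
    (by decide : String.ofList (PySem.Int.toChars 7) = "7"),
    (by decide : String.ofList (PySem.Int.toChars 8) = "8"),
    (by decide : String.ofList (PySem.Int.toChars 9) = "9")]
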